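-- pv_equiv track=rewrite | github.com/eleondella/COMPSCI4077 | SourceCode/tweet_analysis.py | get_mention_interactions
-- ===== SOURCE A (Python) =====
-- def get_mention_interactions(tweet):
--     # From every row of the original dataframe
--     # First we obtain the username of the tweet author
--     user = tweet["username"]
--     # Be careful if there is no user id
--     if user[0] is None:
--         return None, []
--
--     # The interactions are going to be a set of tuples
--     mention_interactions = []
--
--     # Add all interactions
--     for each in range(0,len(tweet['user_mentions_username'])):
--         mention_interactions.append(tweet["user_mentions_username"][each])
--
--     # Discard if user id is in interactions
--     if tweet['username'] in mention_interactions: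
--         mention_interactions.remove(tweet["username"])
--     # Discard all not existing values
--     if None in mention_interactions:
--         mention_interactions.remove(None)
--     # Return user and interactions
--     return user, mention_interactions
-- ===== SOURCE B (Python) =====
-- def get_mention_interactions(tweet):
--     user = tweet["username"]
--     if user[0] is None:
--         return None, []
--     # Single pass: skip the first None mention, keep everything else.
--     # (A's `tweet['username'] in mention_interactions` test compares the username
--     # LIST against string/None elements, so it can never match and is dead code.)
--     result = []
--     removed_none = False
--     for m in tweet["user_mentions_username"]:
--         if not removed_none and m is None:
--             removed_none = True
--             continue
--         result.append(m)
--     return user, result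
-- ===== Notes on version B (the rewrite author's own statement) =====
-- stated objective: simpler
-- what changed: Replaces A's index-loop copy followed by two membership-test-then-remove scans with a single pass that skips the first None while building the result, and drops A's username-removal branch, which is dead code because it compares the username list against string/None elements and can never match.
-- outside the precondition, e.g. on get_mention_interactions({}): A raises KeyError, B raises KeyError; on get_mention_interactions({'username': [], 'user_mentions_username': []}): A raises IndexError, B raises IndexError; on get_mention_interactions({'username': ['u']}): A raises KeyError, B raises KeyError
import Mathlib
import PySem

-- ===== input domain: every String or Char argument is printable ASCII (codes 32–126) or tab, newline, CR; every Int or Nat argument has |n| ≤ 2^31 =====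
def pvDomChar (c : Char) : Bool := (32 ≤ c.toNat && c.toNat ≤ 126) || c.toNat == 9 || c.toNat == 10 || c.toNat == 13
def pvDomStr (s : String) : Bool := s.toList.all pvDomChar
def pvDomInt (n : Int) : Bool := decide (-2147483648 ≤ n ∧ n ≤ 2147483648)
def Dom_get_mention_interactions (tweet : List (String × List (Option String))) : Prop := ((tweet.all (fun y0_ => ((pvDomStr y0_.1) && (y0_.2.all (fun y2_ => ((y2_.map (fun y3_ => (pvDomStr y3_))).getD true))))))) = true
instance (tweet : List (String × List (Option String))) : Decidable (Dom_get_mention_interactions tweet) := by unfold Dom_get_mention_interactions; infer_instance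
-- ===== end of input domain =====

-- B replaces A's copy-loop plus two membership-test-then-remove passes by one pass that
-- skips the first None; A's username-removal branch is dead code (it compares the
-- username LIST against string/None elements, which are never equal in Python).

-- dict lookup on the association list (first match), shared by both ports
def pvLookup (tweet : List (String × List (Option String))) (k : String) :
    Option (List (Option String)) :=
  (tweet.find? (fun p => p.1 == k)).map (·.2)

-- ===== PORT A =====
def get_mention_interactions (tweet : List (String × List (Option String))) : Option (List (Option String)) × List (Option String) :=
  match pvLookup tweet "username" with
  | none => (none, [])              -- KeyError; excluded by Pre_
  | some user =>
    match PySem.List.pyGet? user 0 with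
    | none => (none, [])            -- IndexError; excluded by Pre_
    | some u0 =>
      if u0 = none then (none, [])
      else
        match pvLookup tweet "user_mentions_username" with
        | none => (none, [])        -- KeyError; excluded by Pre_
        | some ms =>
          -- for each in range(0, len(ms)): mention_interactions.append(ms[each])
          let mi := (PySem.List.pyRange 0 (ms.length) 1).foldl
            (fun acc j => acc ++ [PySem.List.pyGetD ms j none]) []
          -- `tweet['username'] in mention_interactions` compares a Python LIST
          -- against string/None elements: always False, so that branch is omitted here.
          let mi := if (none : Option String) ∈ mi
                      then (PySem.List.remove? mi (none : Option String)).getD mi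
                      else mi
          (some user, mi)

-- ===== PORT B =====
-- one pass with a `removed_none` flag (continue past the first None)
def pvSkipFirstNone (removed : Bool) : List (Option String) → List (Option String)
  | [] => []
  | m :: rest =>
      if ¬removed ∧ m = none then pvSkipFirstNone true rest
      else m :: pvSkipFirstNone removed rest

def get_mention_interactions_alt (tweet : List (String × List (Option String))) : Option (List (Option String)) × List (Option String) :=
  match pvLookup tweet "username" with
  | none => (none, [])
  | some user =>
    match PySem.List.pyGet? user 0 with
    | none => (none, [])
    | some u0 =>
      if u0 = none then (none, [])
      else
        match pvLookup tweet "user_mentions_username" with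
        | none => (none, [])
        | some ms => (some user, pvSkipFirstNone false ms)

-- ===== PRECONDITION & SPEC =====
-- Pre_ excludes exactly the inputs where Python A raises: a missing "username" key,
-- an empty username list (IndexError on user[0]), and — when user[0] is not None —
-- a missing "user_mentions_username" key (KeyError).
def Pre_get_mention_interactions (tweet : List (String × List (Option String))) : Prop :=
  (match pvLookup tweet "username" with
   | some (u0 :: _) => u0 == none || (pvLookup tweet "user_mentions_username").isSome
   | _ => false) = true
instance (tweet : List (String × List (Option String))) : Decidable (Pre_get_mention_interactions tweet) := by unfold Pre_get_mention_interactions; infer_instance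

def pvWitness_get_mention_interactions : (List (String × List (Option String))) :=
  [("username", [some "u"]), ("user_mentions_username", [some "x", none, some "u"])]

def Spec_get_mention_interactions (tweet : List (String × List (Option String))) (out : Option (List (Option String)) × List (Option String)) : Prop := out = get_mention_interactions_alt tweet
instance (tweet : List (String × List (Option String))) (out : Option (List (Option String)) × List (Option String)) : Decidable (Spec_get_mention_interactions tweet out) := by unfold Spec_get_mention_interactions; infer_instance

-- ===== CLAIM (what is proved, stated in full; the proofs are below) =====
def Claim_equal_get_mention_interactions : Prop := ∀ (tweet : List (String × List (Option String))), Dom_get_mention_interactions tweet → Pre_get_mention_interactions tweet → Spec_get_mention_interactions tweet (get_mention_interactions tweet)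

-- ===== LEMMAS AND PROOFS =====

theorem pvFlatten_singleton (ms : List (Option String)) :
    (List.map (fun x => [x]) ms).flatten = ms := by
  induction ms with | nil => rfl | cons a t ih => simp [ih]

-- A's index-loop copy is the identity
theorem pvCopy_eq (ms : List (Option String)) :
    (PySem.List.pyRange 0 (ms.length) 1).foldl
      (fun acc j => acc ++ [PySem.List.pyGetD ms j none]) [] = ms := by
  rw [PySem.List.foldl_pyRange_zero_pyGetD' ms (none : Option String) (fun acc x => acc ++ [x]) []]
  simp [pvFlatten_singleton]

-- skipping with the flag already set is the identity
theorem pvSkip_true (ms : List (Option String)) : pvSkipFirstNone true ms = ms := by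
  induction ms with
  | nil => rfl
  | cons m rest ih => simp [pvSkipFirstNone, ih]

-- A's membership-then-remove of the first None equals B's one-pass skip
theorem pvRemove_eq_skip (ms : List (Option String)) :
    (if (none : Option String) ∈ ms
       then (PySem.List.remove? ms (none : Option String)).getD ms
       else ms) = pvSkipFirstNone false ms := by
  induction ms with
  | nil => simp [pvSkipFirstNone]
  | cons m rest ih =>
    by_cases hm : m = none
    · subst hm; simp [pvSkipFirstNone, pvSkip_true]
    · rw [pvSkipFirstNone]
      simp only [hm, and_false, if_false]
      by_cases hmem : (none : Option String) ∈ rest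
      · rw [if_pos (List.mem_cons_of_mem _ hmem),
          PySem.List.remove?_cons_of_ne rest hm,
          PySem.List.remove?_eq_some_erase rest none hmem]
        rw [if_pos hmem, PySem.List.remove?_eq_some_erase rest none hmem] at ih
        simp at ih ⊢
        simpa using ih
      · have hm2 : (none : Option String) ∉ m :: rest := by
          simp [hmem]; exact fun h => hm h.symm
        rw [if_neg hm2]
        rw [if_neg hmem] at ih
        rw [← ih]

-- ===== VERDICT (by name: the statement is the Claim_ definition above) =====
theorem get_mention_interactions_spec : Claim_equal_get_mention_interactions := by
  intro tweet _ hpre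
  unfold Spec_get_mention_interactions get_mention_interactions get_mention_interactions_alt
  unfold Pre_get_mention_interactions at hpre
  cases hu : pvLookup tweet "username" with
  | none => rw [hu] at hpre
  | some user =>
    rw [hu] at hpre
    cases user with
    | nil => simp at hpre
    | cons u0 us =>
      simp only [PySem.List.pyGet?_zero_cons]
      by_cases h0 : u0 = none
      · simp [h0]
      · rw [if_neg h0, if_neg h0]
        cases hm : pvLookup tweet "user_mentions_username" with
        | none => simp [h0, hm] at hpre
        | some ms =>
          simp only [pvCopy_eq, pvRemove_eq_skip]
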